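-- pv_equiv track=rewrite | github.com/boorooksus/Algorithm-Book | 백준/CH05_Greedy/S1-21314-MK_Number2.py | mk_number
-- ===== SOURCE A (Python) =====
-- def mk_number(num: str) -> tuple[str, str]:
--     max_val, min_val = '', ''
--     cnt = 0
--     i = 0
--     while True:
--         while i < len(num) and num[i] == 'M':
--             cnt += 1
--             i += 1
--
--         if i >= len(num):
--             break
--
--         max_val += str(int(5 * 10 ** cnt))
--         if cnt > 0:
--             min_val += str(int(10 ** (cnt - 1)))
--         min_val += '5'
--
--         cnt = 0
--         i += 1
--
--     if cnt > 0:
--         max_val += '1' * cnt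
--         min_val += str(int(10 ** (cnt - 1)))
--
--     return max_val, min_val
-- ===== SOURCE B (Python) =====
-- def mk_number(num: str) -> tuple[str, str]:
--     # Token-list construction: split the string into maximal runs of 'M'
--     # (every non-'M' character is a delimiter), emit one token per group, join once.
--     runs = ''.join('M' if c == 'M' else ' ' for c in num).split(' ')
--     max_parts, min_parts = [], []
--     for run in runs[:-1]:
--         cnt = len(run)
--         max_parts.append('5' + '0' * cnt)
--         min_parts.append(('1' + '0' * (cnt - 1) if cnt > 0 else '') + '5')
--     tail = len(runs[-1])
--     if tail > 0:
--         max_parts.append('1' * tail)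
--         min_parts.append('1' + '0' * (tail - 1))
--     return ''.join(max_parts), ''.join(min_parts)
-- ===== Notes on version B (the rewrite author's own statement) =====
-- stated objective: simpler
-- what changed: Replaces A's manual nested-index while-loop with stateful counter by splitting the string into maximal runs of the target letter (every other char is a delimiter), emitting one token per group into lists, and joining each once.
import Mathlib
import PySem

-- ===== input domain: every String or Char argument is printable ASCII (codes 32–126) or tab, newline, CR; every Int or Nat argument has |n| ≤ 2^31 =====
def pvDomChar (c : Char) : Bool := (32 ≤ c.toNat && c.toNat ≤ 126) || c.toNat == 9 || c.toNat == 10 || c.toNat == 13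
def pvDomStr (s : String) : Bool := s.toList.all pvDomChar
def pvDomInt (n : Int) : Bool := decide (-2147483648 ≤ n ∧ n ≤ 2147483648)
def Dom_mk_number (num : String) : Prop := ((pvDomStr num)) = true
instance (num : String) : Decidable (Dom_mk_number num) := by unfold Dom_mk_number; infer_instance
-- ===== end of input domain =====

-- B replaces A's manual nested-index while-loop with a split-into-runs / per-group token list
-- joined once (objective: simpler); same return value on every input.

-- ===== PORT A =====
-- A's outer `while True` consumes one maximal run of 'M' (the inner while = the `c = 'M'` branch,
-- counting into cnt) and then one delimiter char per iteration; the `i >= len` break is the `[]` case.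
def mkA : List Char → Nat → List Char → List Char → List Char × List Char
  | [], cnt, mx, mn =>
      if cnt > 0 then
        (mx ++ List.replicate cnt '1', mn ++ PySem.Int.toChars ((10 : Int) ^ (cnt - 1)))
      else (mx, mn)
  | c :: rest, cnt, mx, mn =>
      if c = 'M' then mkA rest (cnt + 1) mx mn
      else mkA rest 0 (mx ++ PySem.Int.toChars (5 * (10 : Int) ^ cnt))
                      (mn ++ ((if cnt > 0 then PySem.Int.toChars ((10 : Int) ^ (cnt - 1)) else []) ++ ['5']))

def mk_number (num : String) : String × String :=
  let r := mkA num.toList 0 [] []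
  (String.ofList r.1, String.ofList r.2)

-- ===== PORT B =====
def maskB (c : Char) : Char := if c = 'M' then 'M' else ' '

def maxTokB (cnt : Nat) : List Char := '5' :: List.replicate cnt '0'

def minTokB (cnt : Nat) : List Char :=
  (if cnt > 0 then '1' :: List.replicate (cnt - 1) '0' else []) ++ ['5']

def mk_number_alt (num : String) : String × String :=
  let runs := (num.toList.map maskB).splitOn ' '
  let parts :=
    runs.dropLast.foldl
      (fun (acc : List (List Char) × List (List Char)) run =>
        (acc.1 ++ [maxTokB run.length], acc.2 ++ [minTokB run.length])) ([], [])
  let tail := (runs.getLastD []).length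
  let parts :=
    if tail > 0 then
      (parts.1 ++ [List.replicate tail '1'], parts.2 ++ ['1' :: List.replicate (tail - 1) '0'])
    else parts
  (String.ofList parts.1.flatten, String.ofList parts.2.flatten)

-- ===== PRECONDITION & SPEC =====
def Spec_mk_number (num : String) (out : String × String) : Prop := out = mk_number_alt num
instance (num : String) (out : String × String) : Decidable (Spec_mk_number num out) := by unfold Spec_mk_number; infer_instance

-- ===== CLAIM (what is proved, stated in full; the proofs are below) =====
def Claim_equal_mk_number : Prop := ∀ (num : String), Dom_mk_number num → Spec_mk_number num (mk_number num)

-- ===== LEMMAS AND PROOFS =====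

-- run lengths of the maximal 'M'-runs: (leading-run length, one run length per delimiter gap after it)
def runLens : List Char → Nat × List Nat
  | [] => (0, [])
  | c :: l => if c = 'M' then ((runLens l).1 + 1, (runLens l).2) else (0, (runLens l).1 :: (runLens l).2)

-- common spec on the run-length list (head first)
def specMax : List Nat → List Char
  | [] => []
  | [k] => if k > 0 then List.replicate k '1' else []
  | k :: k' :: t => ('5' :: List.replicate k '0') ++ specMax (k' :: t)

def specMin : List Nat → List Char
  | [] => []
  | [k] => if k > 0 then '1' :: List.replicate (k - 1) '0' else []
  | k :: k' :: t => ((if k > 0 then '1' :: List.replicate (k - 1) '0' else []) ++ ['5']) ++ specMin (k' :: t)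

lemma toDigitsCore_pow (d : Nat) (hd0 : 0 < d) (hd : d < 10) :
    ∀ (k f : Nat) (acc : List Char), k < f →
      Nat.toDigitsCore 10 f (d * 10 ^ k) acc = Nat.digitChar d :: (List.replicate k '0' ++ acc) := by
  intro k
  induction k with
  | zero =>
    intro f acc hf
    match f, hf with
    | f + 1, _ =>
      simp [Nat.toDigitsCore, Nat.div_eq_of_lt hd, Nat.mod_eq_of_lt hd]
  | succ k ih =>
    intro f acc hf
    match f, hf with
    | f + 1, hf =>
      have hdiv : d * 10 ^ (k + 1) / 10 = d * 10 ^ k := by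
        rw [pow_succ, ← Nat.mul_assoc]; exact Nat.mul_div_cancel _ (by omega)
      have hmod : d * 10 ^ (k + 1) % 10 = 0 := by
        rw [pow_succ, ← Nat.mul_assoc]; exact Nat.mul_mod_left _ _
      have hne : ¬ d * 10 ^ (k + 1) / 10 = 0 := by
        rw [hdiv]; positivity
      have hn0 : ¬ d * 10 ^ k = 0 := by positivity
      simp only [Nat.toDigitsCore, hdiv, hmod]
      rw [if_neg hn0, ih f _ (by omega)]
      simp [List.replicate_succ', Nat.digitChar]

lemma toChars_d_pow10 (d k : Nat) (hd0 : 0 < d) (hd : d < 10) :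
    PySem.Int.toChars ((d : Int) * (10 : Int) ^ k) = Nat.digitChar d :: List.replicate k '0' := by
  have hcast : ((d : Int) * (10 : Int) ^ k) = ((d * 10 ^ k : Nat) : Int) := by push_cast; ring
  have hpos : (0 : Int) ≤ ((d * 10 ^ k : Nat) : Int) := Int.natCast_nonneg _
  have hk : k < d * 10 ^ k + 1 := by
    have h1 : k < 10 ^ k := Nat.lt_pow_self (by omega)
    have h2 : 10 ^ k ≤ d * 10 ^ k := Nat.le_mul_of_pos_left _ hd0
    omega
  rw [hcast, PySem.Int.toChars, if_neg (by omega), Int.toNat_natCast, Nat.toDigits,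
    toDigitsCore_pow d hd0 hd k (d * 10 ^ k + 1) [] hk]
  simp

lemma toChars_pow10 (k : Nat) : PySem.Int.toChars ((10 : Int) ^ k) = '1' :: List.replicate k '0' := by
  have := toChars_d_pow10 1 k (by omega) (by omega)
  simpa using this

lemma toChars_five_pow10 (k : Nat) :
    PySem.Int.toChars (5 * (10 : Int) ^ k) = '5' :: List.replicate k '0' := by
  have := toChars_d_pow10 5 k (by omega) (by omega)
  simpa using this

lemma mkA_spec (l : List Char) : ∀ (cnt : Nat) (mx mn : List Char),
    mkA l cnt mx mn = (mx ++ specMax ((cnt + (runLens l).1) :: (runLens l).2),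
                       mn ++ specMin ((cnt + (runLens l).1) :: (runLens l).2)) := by
  induction l with
  | nil =>
    intro cnt mx mn
    simp only [mkA, runLens, Nat.add_zero]
    by_cases h : cnt > 0
    · simp [h, specMax, specMin, toChars_pow10]
    · simp [h, specMax, specMin]
  | cons c l ih =>
    intro cnt mx mn
    by_cases hc : c = 'M'
    · have harg : cnt + 1 + (runLens l).1 = cnt + ((runLens l).1 + 1) := by omega
      subst hc
      rw [show mkA ('M' :: l) cnt mx mn = mkA l (cnt + 1) mx mn from by simp [mkA]]
      rw [ih (cnt + 1) mx mn, harg]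
      simp [runLens]
    · simp only [mkA, if_neg hc, runLens, Nat.add_zero]
      rw [ih 0 _ _]
      simp [specMax, specMin, toChars_five_pow10, toChars_pow10]

lemma splitOn_mask (l : List Char) :
    ((l.map maskB).splitOn ' ').map List.length = (runLens l).1 :: (runLens l).2 := by
  induction l with
  | nil => simp [List.splitOn, List.splitOnP_nil, runLens]
  | cons c l ih =>
    by_cases hc : c = 'M'
    · subst hc
      simp only [List.map_cons, show maskB 'M' = 'M' from rfl, List.splitOn, List.splitOnP_cons] at *
      norm_num
      cases hrs : List.splitOnP (fun x => x == ' ') (List.map maskB l) with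
      | nil => rw [hrs] at ih; simp at ih
      | cons r rs =>
        rw [hrs] at ih
        simp only [List.map_cons] at ih
        injection ih with h1 h2
        simp [List.modifyHead, runLens, h1, h2]
    · have hmask : maskB c = ' ' := by simp [maskB, hc]
      simp only [List.map_cons, hmask, List.splitOn, List.splitOnP_cons] at *
      simp [runLens, hc, ih]

lemma foldParts (rs : List (List Char)) : ∀ (a b : List (List Char)),
    rs.foldl (fun (acc : List (List Char) × List (List Char)) run =>
        (acc.1 ++ [maxTokB run.length], acc.2 ++ [minTokB run.length])) (a, b)
      = (a ++ rs.map (fun r => maxTokB r.length), b ++ rs.map (fun r => minTokB r.length)) := by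
  induction rs with
  | nil => intro a b; simp
  | cons r rs ih => intro a b; simp [List.foldl_cons, ih]

lemma specMax_closed : ∀ (t : List Nat) (k : Nat),
    specMax (k :: t) = ((k :: t).dropLast.map (fun m => maxTokB m)).flatten ++
      (if (k :: t).getLastD 0 > 0 then List.replicate ((k :: t).getLastD 0) '1' else []) := by
  intro t
  induction t with
  | nil => intro k; simp [specMax]
  | cons j t ih => intro k; simp [specMax, maxTokB, ih j]

lemma specMin_closed : ∀ (t : List Nat) (k : Nat),
    specMin (k :: t) = ((k :: t).dropLast.map (fun m => minTokB m)).flatten ++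
      (if (k :: t).getLastD 0 > 0 then '1' :: List.replicate ((k :: t).getLastD 0 - 1) '0' else []) := by
  intro t
  induction t with
  | nil => intro k; simp [specMin]
  | cons j t ih => intro k; simp [specMin, minTokB, ih j]

lemma getLastD_length (rs : List (List Char)) :
    (rs.getLastD []).length = (rs.map List.length).getLastD 0 := by
  rw [List.getLastD_eq_getLast?, List.getLastD_eq_getLast?, List.getLast?_map]
  cases rs.getLast? <;> simp

lemma alt_spec (l : List Char) :
    mk_number_alt (String.ofList l) = (String.ofList (specMax ((runLens l).1 :: (runLens l).2)),
                                   String.ofList (specMin ((runLens l).1 :: (runLens l).2))) := by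
  have hL := splitOn_mask l
  simp only [mk_number_alt, String.toList_ofList]
  rw [foldParts]
  have hdrop : ((l.map maskB).splitOn ' ').dropLast.map (fun r => maxTokB r.length)
      = (((runLens l).1 :: (runLens l).2).dropLast.map (fun m => maxTokB m)) := by
    rw [← hL, List.map_dropLast, List.map_dropLast, List.map_map]; rfl
  have hdrop' : ((l.map maskB).splitOn ' ').dropLast.map (fun r => minTokB r.length)
      = (((runLens l).1 :: (runLens l).2).dropLast.map (fun m => minTokB m)) := by
    rw [← hL, List.map_dropLast, List.map_dropLast, List.map_map]; rfl
  have htail : (((l.map maskB).splitOn ' ').getLastD []).length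
      = (((runLens l).1 :: (runLens l).2)).getLastD 0 := by
    rw [getLastD_length, hL]
  simp only [List.nil_append, hdrop, hdrop', htail]
  rw [specMax_closed, specMin_closed]
  by_cases h : 0 < ((runLens l).1 :: (runLens l).2).getLast?.getD 0 <;>
    simp [h, List.getLastD_eq_getLast?, List.flatten_append]

-- ===== VERDICT (by name: the statement is the Claim_ definition above) =====
theorem mk_number_spec : Claim_equal_mk_number := by
  intro num _
  unfold Spec_mk_number
  have h1 := mkA_spec num.toList 0 [] []
  have h2 := alt_spec num.toList
  rw [show String.ofList num.toList = num from by simp] at h2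
  simp only [mk_number, Nat.zero_add, List.nil_append] at *
  rw [h1, h2]
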